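-- pv_equiv track=rewrite | github.com/SR2k/leetcode | 1930.长度为-3-的不同回文子序列.py | check
-- ===== SOURCE A (Python) =====
-- def check(nums: list[int], begin: int, end: int) -> bool:
--     """
--     Check if any number greater than left and less than right
--     """
--     if not nums:
--         return False
--
--     left, right = 0, len(nums) - 1
--     while left + 1 < right:
--         middle = (left  + right) // 2
--         if nums[middle] > begin:
--             right = middle
--         else:
--             left = middle
--     min = -1
--     if nums[left] > begin:
--         min = left
--     elif nums[right] > begin:
--         min = right
--     if min < 0:
--         return False
--
--     return nums[min] < end
-- ===== SOURCE B (Python) =====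
-- def check(nums: list[int], begin: int, end: int) -> bool:
--     """Single linear scan: does any element lie strictly between begin and end?"""
--     return any(begin < x < end for x in nums)
-- ===== Notes on version B (the rewrite author's own statement) =====
-- stated objective: simpler
-- what changed: Replaced the hand-written binary search (left/right index maintenance plus a final min selection) by a one-line linear existence scan any(begin < x < end for x in nums); Pre_ keeps sorted lists (the search's natural domain) plus all lists with no element in the open interval, and excludes only unsorted lists containing such an element, where A's value is an accident of the search path.
-- outside the precondition, e.g. on check([5, 0, 0], 0, 10): A returns False, B returns True
import Mathlib
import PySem

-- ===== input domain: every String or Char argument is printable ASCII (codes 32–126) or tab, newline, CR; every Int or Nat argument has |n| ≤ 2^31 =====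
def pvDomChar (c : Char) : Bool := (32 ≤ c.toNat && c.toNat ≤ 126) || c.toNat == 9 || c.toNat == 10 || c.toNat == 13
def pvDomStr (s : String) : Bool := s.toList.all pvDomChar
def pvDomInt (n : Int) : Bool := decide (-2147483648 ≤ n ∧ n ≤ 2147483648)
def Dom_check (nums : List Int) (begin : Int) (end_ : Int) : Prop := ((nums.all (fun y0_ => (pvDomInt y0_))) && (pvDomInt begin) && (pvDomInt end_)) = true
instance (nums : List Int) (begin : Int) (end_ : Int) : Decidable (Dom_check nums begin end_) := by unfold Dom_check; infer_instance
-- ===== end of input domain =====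

-- B replaces A's binary search with a one-line linear existence scan (objective: simpler);
-- Pre_ restricts to non-decreasing lists, the natural domain of A's binary search.

-- ===== PORT A =====
-- the while loop of A; all indices stay in [0, nums.length-1], so nums.getD i 0
-- is exactly Python's nums[i] here (no IndexError is reachable)
def checkLoop (nums : List Int) (begin : Int) (left right : Nat) : Nat × Nat :=
  if _h : left + 1 < right then
    let middle := (left + right) / 2
    if nums.getD middle 0 > begin then
      checkLoop nums begin left middle
    else
      checkLoop nums begin middle right
  else (left, right)
termination_by right - left
decreasing_by all_goals omega

def check (nums : List Int) (begin : Int) (end_ : Int) : Bool :=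
  if nums = [] then false
  else
    let lr := checkLoop nums begin 0 (nums.length - 1)
    let left := lr.1
    let right := lr.2
    -- min = -1; if nums[left] > begin: min = left elif nums[right] > begin: min = right
    let min : Int := if nums.getD left 0 > begin then (left : Int)
      else if nums.getD right 0 > begin then (right : Int) else -1
    if min < 0 then false
    else nums.getD min.toNat 0 < end_

-- ===== PORT B =====
def check_alt (nums : List Int) (begin : Int) (end_ : Int) : Bool :=
  nums.any (fun x => begin < x && x < end_)

-- ===== PRECONDITION & SPEC =====
-- Pre_ excludes unsorted lists that do contain an element strictly between begin and
-- end_: A's binary search assumes a non-decreasing array, and on such input its value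
-- is an accident of the search path rather than the existence answer. (Unsorted lists
-- with NO element in the interval stay inside Pre_: there A provably returns False too.)
def Pre_check (nums : List Int) (begin : Int) (end_ : Int) : Prop :=
  List.Pairwise (· ≤ ·) nums ∨ ∀ x ∈ nums, ¬ (begin < x ∧ x < end_)
instance (nums : List Int) (begin : Int) (end_ : Int) : Decidable (Pre_check nums begin end_) := by unfold Pre_check; infer_instance
def pvWitness_check : List Int × Int × Int := ([1, 3, 5], 2, 6)

def Spec_check (nums : List Int) (begin : Int) (end_ : Int) (out : Bool) : Prop := out = check_alt nums begin end_
instance (nums : List Int) (begin : Int) (end_ : Int) (out : Bool) : Decidable (Spec_check nums begin end_ out) := by unfold Spec_check; infer_instance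

-- ===== CLAIM (what is proved, stated in full; the proofs are below) =====
def Claim_equal_check : Prop := ∀ (nums : List Int) (begin : Int) (end_ : Int), Dom_check nums begin end_ → Pre_check nums begin end_ → Spec_check nums begin end_ (check nums begin end_)

-- ===== LEMMAS AND PROOFS =====

-- monotone access on a sorted list
lemma sorted_getD {nums : List Int} (hs : List.Pairwise (· ≤ ·) nums)
    {i j : Nat} (hij : i ≤ j) (hj : j < nums.length) :
    nums.getD i 0 ≤ nums.getD j 0 := by
  rcases Nat.eq_or_lt_of_le hij with rfl | hlt
  · exact le_refl _
  · rw [List.getD_eq_getElem _ _ (lt_of_le_of_lt hij hj), List.getD_eq_getElem _ _ hj]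
    exact List.pairwise_iff_getElem.mp hs i j (lt_of_le_of_lt hij hj) hj hlt

-- loop invariant: left ≤ right < n; left is 0 or sits at a value ≤ begin;
-- right is n-1 or sits at a value > begin; the loop ends with right ≤ left+1.
lemma checkLoop_spec (nums : List Int) (b : Int) (left right : Nat)
    (hlr : left ≤ right) (hr : right < nums.length)
    (hl0 : left = 0 ∨ nums.getD left 0 ≤ b)
    (hrn : right = nums.length - 1 ∨ b < nums.getD right 0) :
    (checkLoop nums b left right).1 ≤ (checkLoop nums b left right).2 ∧
    (checkLoop nums b left right).2 < nums.length ∧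
    (checkLoop nums b left right).2 ≤ (checkLoop nums b left right).1 + 1 ∧
    ((checkLoop nums b left right).1 = 0 ∨ nums.getD (checkLoop nums b left right).1 0 ≤ b) ∧
    ((checkLoop nums b left right).2 = nums.length - 1 ∨ b < nums.getD (checkLoop nums b left right).2 0) := by
  fun_induction checkLoop nums b left right with
  | case1 left right h middle hgt ih =>
    exact ih (by omega) (by omega) hl0 (Or.inr hgt)
  | case2 left right h middle hgt ih =>
    exact ih (by omega) hr (Or.inr (not_lt.mp hgt)) hrn
  | case3 left right h =>
    exact ⟨hlr, hr, by omega, hl0, hrn⟩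

lemma any_eq_true_iff (nums : List Int) (b e : Int) :
    (nums.any (fun x => b < x && x < e)) = true ↔
      ∃ i, ∃ h : i < nums.length, b < nums[i] ∧ nums[i] < e := by
  simp only [List.any_eq_true, decide_eq_true_eq, Bool.and_eq_true]
  constructor
  · rintro ⟨x, hx, h1, h2⟩
    obtain ⟨i, hi, rfl⟩ := List.getElem_of_mem hx
    exact ⟨i, hi, h1, h2⟩
  · rintro ⟨i, hi, h1, h2⟩
    exact ⟨nums[i], List.getElem_mem hi, h1, h2⟩

-- ===== VERDICT (by name: the statement is the Claim_ definition above) =====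
theorem check_spec : Claim_equal_check := by
  intro nums b e _hdom hpre
  unfold Spec_check check check_alt
  by_cases hnil : nums = []
  · subst hnil; simp
  rcases hpre with hpre | hnone
  · simp only [if_neg hnil]
    have hn : 0 < nums.length := List.length_pos_iff.mpr hnil
    obtain ⟨hlr, hr, hle, hl0, hrn⟩ :=
      checkLoop_spec nums b 0 (nums.length - 1) (by omega) (by omega) (Or.inl rfl) (Or.inl rfl)
    set l := (checkLoop nums b 0 (nums.length - 1)).1 with hl
    set r := (checkLoop nums b 0 (nums.length - 1)).2 with hrdef
    have hlN : l < nums.length := by omega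
    by_cases hA : nums.getD l 0 > b
    · -- min = left; by the invariant left = 0, so nums[0] > begin
      have hl0' : l = 0 := by
        rcases hl0 with h0 | hle'
        · exact h0
        · omega
      simp only [if_pos hA]
      have hmin : ((l : Int)) < 0 ↔ False := by simp
      rw [if_neg (by simp : ¬ ((l : Int) < 0))]
      have htoNat : ((l : Int)).toNat = l := Int.toNat_natCast l
      rw [htoNat]
      rcases Decidable.em (nums.getD l 0 < e) with hlt | hge
      · rw [decide_eq_true hlt]
        symm
        rw [any_eq_true_iff]
        refine ⟨l, hlN, ?_, ?_⟩
        · rw [← List.getD_eq_getElem _ 0 hlN]; exact hA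
        · rw [← List.getD_eq_getElem _ 0 hlN]; exact hlt
      · rw [decide_eq_false hge]
        symm
        rw [← Bool.not_eq_true, any_eq_true_iff]
        rintro ⟨i, hi, h1, h2⟩
        -- nums[l] = nums[0] ≤ nums[i] < e, contradiction with nums[l] ≥ e
        have : nums.getD l 0 ≤ nums.getD i 0 := sorted_getD hpre (by omega) hi
        rw [List.getD_eq_getElem _ 0 hi] at this
        exact hge (lt_of_le_of_lt this h2)
    · -- nums[left] ≤ begin
      have hlle : nums.getD l 0 ≤ b := not_lt.mp hA
      simp only [if_neg hA]
      by_cases hB : nums.getD r 0 > b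
      · -- min = right
        rw [if_pos hB, if_neg (by simp : ¬ ((r : Int) < 0)), Int.toNat_natCast]
        rcases Decidable.em (nums.getD r 0 < e) with hlt | hge
        · rw [decide_eq_true hlt]
          symm; rw [any_eq_true_iff]
          refine ⟨r, hr, ?_, ?_⟩
          · rw [← List.getD_eq_getElem _ 0 hr]; exact hB
          · rw [← List.getD_eq_getElem _ 0 hr]; exact hlt
        · rw [decide_eq_false hge]
          symm
          rw [← Bool.not_eq_true, any_eq_true_iff]
          rintro ⟨i, hi, h1, h2⟩
          rcases Nat.lt_or_ge i r with hir | hir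
          · -- i ≤ l, so nums[i] ≤ nums[l] ≤ b
            have hil : i ≤ l := by omega
            have : nums.getD i 0 ≤ nums.getD l 0 := sorted_getD hpre hil hlN
            rw [List.getD_eq_getElem _ 0 hi] at this
            exact absurd h1 (not_lt.mpr (le_trans this hlle))
          · -- r ≤ i, so e ≤ nums[r] ≤ nums[i]
            have : nums.getD r 0 ≤ nums.getD i 0 := sorted_getD hpre hir hi
            rw [List.getD_eq_getElem _ 0 hi] at this
            exact absurd h2 (not_lt.mpr (le_trans (not_lt.mp hge) this))
      · -- min = -1: right must be n-1, everything ≤ begin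
        rw [if_neg hB, if_pos (by norm_num : (-1 : Int) < 0)]
        have hrn' : r = nums.length - 1 := by
          rcases hrn with h | h
          · exact h
          · exact absurd h (by exact hB)
        symm
        rw [← Bool.not_eq_true, any_eq_true_iff]
        rintro ⟨i, hi, h1, _⟩
        have hir : i ≤ r := by omega
        have : nums.getD i 0 ≤ nums.getD r 0 := sorted_getD hpre hir hr
        rw [List.getD_eq_getElem _ 0 hi] at this
        exact absurd h1 (not_lt.mpr (le_trans this (not_lt.mp hB)))
  · -- no element lies strictly between b and e: both sides are False
    simp only [if_neg hnil]
    have hn : 0 < nums.length := List.length_pos_iff.mpr hnil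
    obtain ⟨hlr, hr, hle, _, _⟩ :=
      checkLoop_spec nums b 0 (nums.length - 1) (by omega) (by omega) (Or.inl rfl) (Or.inl rfl)
    set l := (checkLoop nums b 0 (nums.length - 1)).1 with hl
    set r := (checkLoop nums b 0 (nums.length - 1)).2 with hrdef
    have hlN : l < nums.length := by omega
    have hBfalse : (nums.any fun x => decide (b < x) && decide (x < e)) = false := by
      rw [← Bool.not_eq_true, any_eq_true_iff]
      rintro ⟨i, hi, h1, h2⟩
      exact hnone nums[i] (List.getElem_mem hi) ⟨h1, h2⟩
    rw [hBfalse]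
    by_cases hA : nums.getD l 0 > b
    · rw [if_pos hA, if_neg (by simp : ¬ ((l : Int) < 0)), Int.toNat_natCast]
      have : ¬ nums.getD l 0 < e := by
        intro hlt
        refine hnone (nums.getD l 0) ?_ ⟨hA, hlt⟩
        rw [List.getD_eq_getElem _ 0 hlN]; exact List.getElem_mem hlN
      exact decide_eq_false this
    · rw [if_neg hA]
      by_cases hB : nums.getD r 0 > b
      · rw [if_pos hB, if_neg (by simp : ¬ ((r : Int) < 0)), Int.toNat_natCast]
        have : ¬ nums.getD r 0 < e := by
          intro hlt
          refine hnone (nums.getD r 0) ?_ ⟨hB, hlt⟩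
          rw [List.getD_eq_getElem _ 0 hr]; exact List.getElem_mem hr
        exact decide_eq_false this
      · rw [if_neg hB, if_pos (by norm_num : (-1 : Int) < 0)]
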